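-- pv_equiv track=rewrite | github.com/Redzwinger/Redzwingers-Practice-Station | Chapter 1 - The Beginning/P1-7.py | do_things
-- ===== SOURCE A (Python) =====
-- def do_things(thing, thingu):
--     l1 = []
--     Elie = -1
--
--     for g in range(0, thing):
--         l2 = []
--         Elie += 1
--
--         for v in range(0, thingu):
--             blah = v * Elie
--             l2.append(blah)
--
--         l1.append(l2)
--
--     return l1
-- ===== SOURCE B (Python) =====
-- def do_things(thing, thingu):
--     if thing <= 0:
--         return []
--     base = list(range(0, thingu))
--     row = [0] * len(base)
--     out = []
--     for _ in range(0, thing):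
--         out.append(row)
--         row = [r + b for r, b in zip(row, base)]
--     return out
-- ===== Notes on version B (the rewrite author's own statement) =====
-- stated objective: alternative
-- what changed: B builds each row by accumulating repeated element-wise addition of the base row (row_{g+1} = row_g + base) instead of computing v*Elie with a counter in a nested multiply loop.
import Mathlib
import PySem

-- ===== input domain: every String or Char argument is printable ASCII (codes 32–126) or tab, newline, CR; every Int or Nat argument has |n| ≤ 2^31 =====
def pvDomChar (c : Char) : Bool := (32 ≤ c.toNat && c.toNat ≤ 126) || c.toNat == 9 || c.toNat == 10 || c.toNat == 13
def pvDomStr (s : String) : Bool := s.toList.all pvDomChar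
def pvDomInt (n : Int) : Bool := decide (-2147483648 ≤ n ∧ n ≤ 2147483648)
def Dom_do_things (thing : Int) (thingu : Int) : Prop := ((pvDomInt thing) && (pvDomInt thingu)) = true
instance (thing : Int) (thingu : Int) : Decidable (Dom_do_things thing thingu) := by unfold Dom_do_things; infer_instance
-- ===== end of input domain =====

-- B builds each row by accumulated element-wise addition of the base row instead of a nested multiply loop; same cost, different decomposition.

-- ===== PORT A =====
def do_things (thing : Int) (thingu : Int) : List (List Int) :=
  ((PySem.List.pyRange 0 thing 1).foldl
    (fun (st : List (List Int) × Int) _g =>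
      let Elie := st.2 + 1
      let l2 := (PySem.List.pyRange 0 thingu 1).foldl (fun l2 v => l2 ++ [v * Elie]) []
      (st.1 ++ [l2], Elie))
    ([], -1)).1

-- ===== PORT B =====
def do_things_alt (thing : Int) (thingu : Int) : List (List Int) :=
  if thing ≤ 0 then [] else
  let base := PySem.List.pyRange 0 thingu 1
  ((PySem.List.pyRange 0 thing 1).foldl
    (fun (st : List (List Int) × List Int) _g =>
      (st.1 ++ [st.2], (st.2.zip base).map (fun p => p.1 + p.2)))
    ([], base.map (fun _ => 0))).1

-- ===== PRECONDITION & SPEC =====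
def Spec_do_things (thing : Int) (thingu : Int) (out : List (List Int)) : Prop := out = do_things_alt thing thingu
instance (thing : Int) (thingu : Int) (out : List (List Int)) : Decidable (Spec_do_things thing thingu out) := by unfold Spec_do_things; infer_instance

-- ===== CLAIM (what is proved, stated in full; the proofs are below) =====
def Claim_equal_do_things : Prop := ∀ (thing : Int) (thingu : Int), Dom_do_things thing thingu → Spec_do_things thing thingu (do_things thing thingu)

-- ===== LEMMAS AND PROOFS =====

-- A's inner loop is a map
lemma inner_loop_map (l : List Int) (k : Int) (acc : List Int) :
    l.foldl (fun l2 v => l2 ++ [v * k]) acc = acc ++ l.map (fun v => v * k) := by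
  induction l generalizing acc with
  | nil => simp
  | cons x xs ih => simp [List.foldl, ih]

-- B's row update advances the multiple by one
lemma zip_add_step (l : List Int) (k : Int) :
    ((l.map (fun v => v * k)).zip l).map (fun p => p.1 + p.2) = l.map (fun v => v * (k + 1)) := by
  induction l with
  | nil => simp
  | cons x xs ih => simp [ih]; ring

-- invariant of A's outer fold
lemma stateA (thingu : Int) (n : Nat) :
    (PySem.List.pyRange 0 (n : Int) 1).foldl
      (fun (st : List (List Int) × Int) _g =>
        let Elie := st.2 + 1
        let l2 := (PySem.List.pyRange 0 thingu 1).foldl (fun l2 v => l2 ++ [v * Elie]) []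
        (st.1 ++ [l2], Elie))
      ([], -1)
    = ((List.range n).map (fun g => (PySem.List.pyRange 0 thingu 1).map (fun v => v * (g : Int))),
       (n : Int) - 1) := by
  induction n with
  | zero => simp [PySem.List.pyRange_one_eq_nil]
  | succ m ih =>
      have h : PySem.List.pyRange 0 ((m + 1 : Nat) : Int) 1
          = PySem.List.pyRange 0 (m : Int) 1 ++ [(m : Int)] := by
        push_cast
        exact PySem.List.pyRange_one_succ_right (by positivity)
      rw [h, List.foldl_append, ih, List.range_succ]
      dsimp only [List.foldl]
      have e : ((m : Int) - 1) + 1 = (m : Int) := by ring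
      rw [e, inner_loop_map]
      simp

-- invariant of B's outer fold
lemma stateB (thingu : Int) (n : Nat) :
    (PySem.List.pyRange 0 (n : Int) 1).foldl
      (fun (st : List (List Int) × List Int) _g =>
        (st.1 ++ [st.2], (st.2.zip (PySem.List.pyRange 0 thingu 1)).map (fun p => p.1 + p.2)))
      ([], (PySem.List.pyRange 0 thingu 1).map (fun _ => 0))
    = ((List.range n).map (fun g => (PySem.List.pyRange 0 thingu 1).map (fun v => v * (g : Int))),
       (PySem.List.pyRange 0 thingu 1).map (fun v => v * (n : Int))) := by
  induction n with
  | zero => simp [PySem.List.pyRange_one_eq_nil]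
  | succ m ih =>
      have h : PySem.List.pyRange 0 ((m + 1 : Nat) : Int) 1
          = PySem.List.pyRange 0 (m : Int) 1 ++ [(m : Int)] := by
        push_cast
        exact PySem.List.pyRange_one_succ_right (by positivity)
      rw [h, List.foldl_append, ih, List.range_succ]
      dsimp only [List.foldl]
      rw [zip_add_step]
      simp

-- ===== VERDICT (by name: the statement is the Claim_ definition above) =====
theorem do_things_spec : Claim_equal_do_things := by
  intro thing thingu _
  unfold Spec_do_things do_things do_things_alt
  by_cases h : thing ≤ 0
  · simp [h, PySem.List.pyRange_one_eq_nil h]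
  · rw [if_neg h]
    have hn : thing = ((thing.toNat : Nat) : Int) := (Int.toNat_of_nonneg (by omega)).symm
    rw [hn]
    simp only [stateA, stateB]
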